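-- pv_equiv track=rewrite | github.com/MrBrantCode/unitest_baseline | mut_generate/mist_train_cf/cf_97189/solution.py | remove_duplicates_and_primes
-- ===== SOURCE A (Python) =====
-- def remove_duplicates_and_primes(lst):
--     unique_primes = []  # List to store unique prime elements
--
--     for num in lst:
--         # Check if the number is already encountered
--         if num in unique_primes:
--             continue
--
--         # Check if the number is prime
--         is_prime = True
--         if num > 1:
--             for i in range(2, num):
--                 if (num % i) == 0:
--                     is_prime = False
--                     break
--
--         # Add the number to the list if it is prime and not encountered before
--         if is_prime:
--             unique_primes.append(num)
--
--     return unique_primes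
-- ===== SOURCE B (Python) =====
-- def remove_duplicates_and_primes(lst):
--     seen = set()
--     out = []
--     for num in lst:
--         if num in seen:
--             continue
--         seen.add(num)
--         if num <= 1:
--             out.append(num)
--             continue
--         keep = True
--         i = 2
--         while i * i <= num:
--             if num % i == 0:
--                 keep = False
--                 break
--             i += 1
--         if keep:
--             out.append(num)
--     return out
-- ===== Notes on version B (the rewrite author's own statement) =====
-- stated objective: faster
-- what changed: B dedups with a hash set instead of scanning the output list, and tests primality by trial division only up to sqrt(num) instead of over all of range(2, num).
import Mathlib
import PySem

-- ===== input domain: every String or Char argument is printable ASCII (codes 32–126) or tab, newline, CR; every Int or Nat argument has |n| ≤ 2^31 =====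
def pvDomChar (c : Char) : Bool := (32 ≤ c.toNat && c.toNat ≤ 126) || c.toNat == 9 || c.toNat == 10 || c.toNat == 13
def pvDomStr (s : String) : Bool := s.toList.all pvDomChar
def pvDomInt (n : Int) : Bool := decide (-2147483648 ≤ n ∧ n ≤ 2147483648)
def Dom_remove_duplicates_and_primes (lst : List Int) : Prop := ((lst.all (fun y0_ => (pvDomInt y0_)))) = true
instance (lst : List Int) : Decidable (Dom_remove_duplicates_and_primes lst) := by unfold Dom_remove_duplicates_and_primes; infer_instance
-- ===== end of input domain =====

-- B replaces A's list-membership dedup and trial division over all of range(2, num)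
-- by a set-based seen check and trial division only while i*i <= num (objective: faster).

-- ===== PORT A =====
-- 'for i in range(2, num)': fuel counts the remaining iterations, i is the loop variable
def pvLoopA (num : Int) : Nat → Int → Bool
  | 0, _ => true
  | fuel+1, i => if PySem.Int.mod num i == 0 then false else pvLoopA num fuel (i + 1)

def pvIsPrimeA (num : Int) : Bool :=
  if num > 1 then pvLoopA num (num - 2).toNat 2 else true

def pvStepA (unique_primes : List Int) (num : Int) : List Int :=
  if num ∈ unique_primes then unique_primes
  else if pvIsPrimeA num then unique_primes ++ [num] else unique_primes

def remove_duplicates_and_primes (lst : List Int) : List Int :=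
  lst.foldl pvStepA []

-- ===== PORT B =====
-- 'while i * i <= num': fuel bounds the iterations (num.toNat is ample since i grows by 1)
def pvLoopB (num : Int) : Nat → Int → Bool
  | 0, _ => true
  | fuel+1, i =>
    if i * i ≤ num then
      if PySem.Int.mod num i == 0 then false else pvLoopB num fuel (i + 1)
    else true

def pvKeepB (num : Int) : Bool := pvLoopB num num.toNat 2

def pvStepB (st : PySem.Set Int × List Int) (num : Int) : PySem.Set Int × List Int :=
  if PySem.Set.contains st.1 num then st
  else
    let seen := PySem.Set.add st.1 num
    if num ≤ 1 then (seen, st.2 ++ [num])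
    else if pvKeepB num then (seen, st.2 ++ [num]) else (seen, st.2)

def remove_duplicates_and_primes_alt (lst : List Int) : List Int :=
  (lst.foldl pvStepB (PySem.Set.empty, [])).2

-- ===== PRECONDITION & SPEC =====
def Spec_remove_duplicates_and_primes (lst : List Int) (out : List Int) : Prop := out = remove_duplicates_and_primes_alt lst
instance (lst : List Int) (out : List Int) : Decidable (Spec_remove_duplicates_and_primes lst out) := by unfold Spec_remove_duplicates_and_primes; infer_instance

-- ===== CLAIM (what is proved, stated in full; the proofs are below) =====
def Claim_equal_remove_duplicates_and_primes : Prop := ∀ (lst : List Int), Dom_remove_duplicates_and_primes lst → Spec_remove_duplicates_and_primes lst (remove_duplicates_and_primes lst)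

-- ===== LEMMAS AND PROOFS =====

-- A's inner loop tests every candidate divisor in [i, i+fuel)
theorem pvLoopA_char (num : Int) : ∀ (fuel : Nat) (i : Int),
    pvLoopA num fuel i = true ↔ ∀ k : Int, i ≤ k → k < i + fuel → ¬ k ∣ num := by
  intro fuel
  induction fuel with
  | zero =>
    intro i
    simp only [pvLoopA, Nat.cast_zero, add_zero, true_iff]
    intro k hk hlt
    omega
  | succ n ih =>
    intro i
    simp only [pvLoopA]
    by_cases hdvd : i ∣ num
    · have h0 : PySem.Int.mod num i = 0 := (PySem.Int.mod_eq_zero_iff_dvd num i).mpr hdvd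
      simp only [h0, beq_self_eq_true, if_true, Bool.false_eq_true, false_iff, not_forall]
      exact ⟨i, le_refl i, by push_cast; omega, fun h => h hdvd⟩
    · have h0 : ¬ PySem.Int.mod num i = 0 := fun h => hdvd ((PySem.Int.mod_eq_zero_iff_dvd num i).mp h)
      simp only [beq_iff_eq, h0, if_false]
      rw [ih]
      constructor
      · intro h k hk hlt
        rcases eq_or_lt_of_le hk with rfl | hk'
        · exact hdvd
        · exact h k (by omega) (by push_cast at *; omega)
      · intro h k hk hlt
        exact h k (by omega) (by push_cast at *; omega)

-- B's inner loop tests every candidate divisor k ≥ i with k*k ≤ num (fuel ample)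
theorem pvLoopB_char (num : Int) : ∀ (fuel : Nat) (i : Int), 1 ≤ i →
    num < (i + fuel) * (i + fuel) →
    (pvLoopB num fuel i = true ↔ ∀ k : Int, i ≤ k → k * k ≤ num → ¬ k ∣ num) := by
  intro fuel
  induction fuel with
  | zero =>
    intro i hi hnum
    simp only [Nat.cast_zero, add_zero] at hnum
    simp only [pvLoopB, true_iff]
    intro k hk hkk
    exfalso
    nlinarith
  | succ n ih =>
    intro i hi hnum
    simp only [pvLoopB]
    by_cases hii : i * i ≤ num
    · simp only [hii, if_true]
      by_cases hdvd : i ∣ num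
      · have h0 : PySem.Int.mod num i = 0 := (PySem.Int.mod_eq_zero_iff_dvd num i).mpr hdvd
        simp only [h0, beq_self_eq_true, if_true, Bool.false_eq_true, false_iff, not_forall]
        exact ⟨i, le_refl i, hii, fun h => h hdvd⟩
      · have h0 : ¬ PySem.Int.mod num i = 0 := fun h => hdvd ((PySem.Int.mod_eq_zero_iff_dvd num i).mp h)
        simp only [beq_iff_eq, h0, if_false]
        rw [ih (i + 1) (by omega) (by push_cast at *; nlinarith)]
        constructor
        · intro h k hk hkk
          rcases eq_or_lt_of_le hk with rfl | hk'
          · exact hdvd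
          · exact h k (by omega) hkk
        · intro h k hk hkk
          exact h k (by omega) hkk
    · simp only [hii, if_false, true_iff]
      intro k hk hkk
      exfalso
      have hik : i * i ≤ k * k := by nlinarith
      omega

-- for num > 1, checking all divisors below num is the same as checking divisors up to √num
theorem divisor_quant_equiv (num : Int) (h : 1 < num) :
    (∀ k : Int, 2 ≤ k → k < num → ¬ k ∣ num) ↔ (∀ k : Int, 2 ≤ k → k * k ≤ num → ¬ k ∣ num) := by
  constructor
  · intro h' k hk hkk
    exact h' k hk (by nlinarith)
  · intro h' k hk hlt hdvd
    obtain ⟨m, hm⟩ := hdvd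
    have hkpos : (0 : Int) < k := by omega
    have hm2 : 2 ≤ m := by nlinarith
    by_cases hcmp : k * k ≤ num
    · exact h' k hk hcmp ⟨m, hm⟩
    · have hmk : m < k := by nlinarith
      exact h' m hm2 (by nlinarith) ⟨k, by rw [hm]; ring⟩

-- A's primality test equals B's keep test
theorem keep_eq (num : Int) :
    pvIsPrimeA num = (if num ≤ 1 then true else pvKeepB num) := by
  by_cases h : 1 < num
  · have h1 : ¬ num ≤ 1 := by omega
    simp only [pvIsPrimeA, pvKeepB, h, if_true, h1, if_false]
    rw [Bool.eq_iff_iff]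
    have hA := pvLoopA_char num (num - 2).toNat 2
    have hcast : (((num - 2).toNat : Nat) : Int) = num - 2 := by omega
    rw [hcast, show (2 : Int) + (num - 2) = num by ring] at hA
    have hB := pvLoopB_char num num.toNat 2 (by omega)
      (by have hc : ((num.toNat : Nat) : Int) = num := by omega
          rw [hc]; nlinarith)
    rw [hA, hB, divisor_quant_equiv num h]
  · have h1 : num ≤ 1 := by omega
    simp [pvIsPrimeA, h, h1]

-- the two folds agree under the invariant: out holds exactly the seen elements A keeps
theorem fold_agree (lst : List Int) : ∀ (seen : PySem.Set Int) (out : List Int),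
    (∀ x : Int, x ∈ out ↔ (x ∈ seen ∧ pvIsPrimeA x = true)) →
    lst.foldl pvStepA out = (lst.foldl pvStepB (seen, out)).2 := by
  induction lst with
  | nil => intro seen out _; rfl
  | cons num rest ih =>
    intro seen out hinv
    simp only [List.foldl_cons]
    by_cases hseen : num ∈ seen
    · have hc : PySem.Set.contains seen num = true := (PySem.Set.contains_iff seen num).mpr hseen
      have hB : pvStepB (seen, out) num = (seen, out) := by
        simp [pvStepB, hseen]
      have hA : pvStepA out num = out := by
        by_cases hmem : num ∈ out
        · simp [pvStepA, hmem]
        · have hnp : ¬ pvIsPrimeA num = true := fun hp => hmem ((hinv num).mpr ⟨hseen, hp⟩)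
          simp [pvStepA, hmem, hnp]
      rw [hA, hB]
      exact ih seen out hinv
    · have hc : ¬ PySem.Set.contains seen num = true := fun h => hseen ((PySem.Set.contains_iff seen num).mp h)
      have hout : num ∉ out := fun h => hseen ((hinv num).mp h).1
      have hB : pvStepB (seen, out) num =
          (PySem.Set.add seen num, if pvIsPrimeA num then out ++ [num] else out) := by
        simp only [pvStepB, hc, if_false, Bool.false_eq_true]
        rw [keep_eq num]
        by_cases h1 : num ≤ 1
        · simp [h1]
        · by_cases hk : pvKeepB num = true <;> simp [h1, hk]
      have hA : pvStepA out num = (if pvIsPrimeA num then out ++ [num] else out) := by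
        simp [pvStepA, hout]
      rw [hA, hB]
      apply ih
      intro x
      by_cases hp : pvIsPrimeA num = true
      · simp only [hp, if_true, List.mem_append, List.mem_singleton, PySem.Set.mem_add]
        constructor
        · rintro (hx | rfl)
          · exact ⟨Or.inl ((hinv x).mp hx).1, ((hinv x).mp hx).2⟩
          · exact ⟨Or.inr rfl, hp⟩
        · rintro ⟨hx | rfl, hpx⟩
          · exact Or.inl ((hinv x).mpr ⟨hx, hpx⟩)
          · exact Or.inr rfl
      · simp only [hp, if_false, Bool.false_eq_true, PySem.Set.mem_add]
        constructor
        · intro hx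
          exact ⟨Or.inl ((hinv x).mp hx).1, ((hinv x).mp hx).2⟩
        · rintro ⟨hx | rfl, hpx⟩
          · exact (hinv x).mpr ⟨hx, hpx⟩
          · exact absurd hpx hp
      
-- ===== VERDICT (by name: the statement is the Claim_ definition above) =====
theorem remove_duplicates_and_primes_spec : Claim_equal_remove_duplicates_and_primes := by
  intro lst _
  unfold Spec_remove_duplicates_and_primes remove_duplicates_and_primes remove_duplicates_and_primes_alt
  exact fold_agree lst PySem.Set.empty [] (by simp [PySem.Set.empty])
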